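-- pv_equiv track=rewrite | github.com/bluhmskidmore-tech/arvinfinanceanalyse | backend/app/services/product_category_pnl_service.py | _reduce_latest_adjustments
-- ===== SOURCE A (Python) =====
-- def _reduce_latest_adjustments(events: list[dict[str, object]]) -> list[dict[str, object]]:
--     latest_by_id: dict[str, dict[str, object]] = {}
--     for event in events:
--         adjustment_id = str(event["adjustment_id"])
--         existing = latest_by_id.get(adjustment_id)
--         if existing is None or str(event["created_at"]) >= str(existing["created_at"]):
--             latest_by_id[adjustment_id] = event
--     return list(latest_by_id.values())
-- ===== SOURCE B (Python) =====
-- def _reduce_latest_adjustments(events: list[dict[str, object]]) -> list[dict[str, object]]: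
--     groups: dict[str, list[dict[str, object]]] = {}
--     for event in events:
--         groups.setdefault(str(event["adjustment_id"]), []).append(event)
--     result: list[dict[str, object]] = []
--     for group in groups.values():
--         best = group[0]
--         for event in group[1:]:
--             if str(event["created_at"]) >= str(best["created_at"]):
--                 best = event
--         result.append(best)
--     return result
-- ===== Notes on version B (the rewrite author's own statement) =====
-- stated objective: alternative
-- what changed: A keeps one running-latest event per adjustment_id updated online in a single dict pass; B first groups all events into per-id lists (dict of lists, first-seen key order) and then reduces each group to its last maximal-created_at element in a second pass.
import Mathlib
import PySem

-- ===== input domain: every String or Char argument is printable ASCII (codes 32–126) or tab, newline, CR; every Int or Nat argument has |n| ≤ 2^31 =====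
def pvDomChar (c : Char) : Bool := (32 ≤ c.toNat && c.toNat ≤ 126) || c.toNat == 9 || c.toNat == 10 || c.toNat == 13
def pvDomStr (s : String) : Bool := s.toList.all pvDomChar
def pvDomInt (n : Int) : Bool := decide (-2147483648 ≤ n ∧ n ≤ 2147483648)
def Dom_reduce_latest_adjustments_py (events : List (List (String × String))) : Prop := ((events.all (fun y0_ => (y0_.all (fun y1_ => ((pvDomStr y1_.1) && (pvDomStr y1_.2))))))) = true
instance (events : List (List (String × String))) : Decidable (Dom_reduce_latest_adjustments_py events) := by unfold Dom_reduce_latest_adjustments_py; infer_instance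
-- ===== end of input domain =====

-- B replaces A's online running-max dict with a group-then-reduce decomposition (same cost, different structure); equivalence is about the return value.

-- ===== PORT A =====
-- Literal port of A: one dict keyed by adjustment_id holding the current latest event;
-- event["…"] is ported as (Dict.ofList event).getD "…" "" — the default "" is reached only
-- where Python raises KeyError, and Pre_ excludes exactly those inputs.
def reduce_latest_adjustments_py (events : List (List (String × String))) : List (List (String × String)) :=
  (events.foldl (fun latest_by_id event =>
      let adjustment_id := (PySem.Dict.ofList event).getD "adjustment_id" ""
      match latest_by_id.get? adjustment_id with
      | none => latest_by_id.insert adjustment_id event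
      | some existing =>
          if (PySem.Dict.ofList event).getD "created_at" "" ≥ (PySem.Dict.ofList existing).getD "created_at" "" then
            latest_by_id.insert adjustment_id event
          else latest_by_id)
    (PySem.Dict.empty : PySem.Dict String (List (String × String)))).values

-- ===== PORT B =====
-- g[0] / g[1:] reduction of one group; groups are never empty, so the [] branch
-- (Python's IndexError on group[0]) is unreachable.
def pvGroupBest (best : List (String × String)) (rest : List (List (String × String))) : List (String × String) :=
  rest.foldl (fun best event =>
      if (PySem.Dict.ofList event).getD "created_at" "" ≥ (PySem.Dict.ofList best).getD "created_at" "" then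
        event
      else best)
    best

def pvReduceGroup (group : List (List (String × String))) : List (String × String) :=
  match group with
  | [] => []
  | best :: rest => pvGroupBest best rest

def reduce_latest_adjustments_py_alt (events : List (List (String × String))) : List (List (String × String)) :=
  let groups := events.foldl (fun groups event =>
      groups.modify ((PySem.Dict.ofList event).getD "adjustment_id" "") [] (· ++ [event]))
    (PySem.Dict.empty : PySem.Dict String (List (List (String × String))))
  groups.values.map pvReduceGroup

-- ===== PRECONDITION & SPEC =====
def pvAidStr (event : List (String × String)) : String :=
  (PySem.Dict.ofList event).getD "adjustment_id" ""

-- Pre_ excludes exactly the inputs on which the Python A raises KeyError (an event without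
-- "adjustment_id", or an event in a group of two or more sharing an adjustment_id without
-- "created_at"); A returns normally on every input admitted here, and B raises on the same inputs.
def Pre_reduce_latest_adjustments_py (events : List (List (String × String))) : Prop :=
  (∀ e ∈ events, "adjustment_id" ∈ e.map Prod.fst) ∧
  (∀ e ∈ events, 2 ≤ (events.map pvAidStr).count (pvAidStr e) → "created_at" ∈ e.map Prod.fst)
instance (events : List (List (String × String))) : Decidable (Pre_reduce_latest_adjustments_py events) := by unfold Pre_reduce_latest_adjustments_py; infer_instance

def pvWitness_reduce_latest_adjustments_py : (List (List (String × String))) :=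
  [[("adjustment_id", "a"), ("created_at", "1")], [("adjustment_id", "a"), ("created_at", "2")]]

def Spec_reduce_latest_adjustments_py (events : List (List (String × String))) (out : List (List (String × String))) : Prop := out = reduce_latest_adjustments_py_alt events
instance (events : List (List (String × String))) (out : List (List (String × String))) : Decidable (Spec_reduce_latest_adjustments_py events out) := by unfold Spec_reduce_latest_adjustments_py; infer_instance

-- ===== CLAIM (what is proved, stated in full; the proofs are below) =====
def Claim_equal_reduce_latest_adjustments_py : Prop := ∀ (events : List (List (String × String))), Dom_reduce_latest_adjustments_py events → Pre_reduce_latest_adjustments_py events → Spec_reduce_latest_adjustments_py events (reduce_latest_adjustments_py events)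

-- ===== LEMMAS AND PROOFS =====
theorem pv_red_singleton (e : List (String × String)) : pvReduceGroup [e] = e := rfl

theorem pv_red_append (g : List (List (String × String))) (e : List (String × String)) (hg : g ≠ []) :
    pvReduceGroup (g ++ [e]) =
      if (PySem.Dict.ofList e).getD "created_at" "" ≥ (PySem.Dict.ofList (pvReduceGroup g)).getD "created_at" "" then e
      else pvReduceGroup g := by
  cases g with
  | nil => exact absurd rfl hg
  | cons b r => simp [pvReduceGroup, pvGroupBest, List.foldl_append]

theorem pv_get?_rel (dA : PySem.Dict String (List (String × String)))
    (dG : PySem.Dict String (List (List (String × String))))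
    (h : dA.items = dG.items.map (fun p => (p.1, pvReduceGroup p.2))) (k : String) :
    dA.get? k = (dG.get? k).map pvReduceGroup := by
  simp [PySem.Dict.get?, h, List.find?_map, Function.comp_def]

theorem pv_main (events : List (List (String × String)))
    (dA : PySem.Dict String (List (String × String)))
    (dG : PySem.Dict String (List (List (String × String))))
    (h1 : dA.items = dG.items.map (fun p => (p.1, pvReduceGroup p.2)))
    (h2 : ∀ p ∈ dG.items, p.2 ≠ [])
    (h3 : dG.keys.Nodup) :
    (events.foldl (fun latest_by_id event =>
        let adjustment_id := (PySem.Dict.ofList event).getD "adjustment_id" ""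
        match latest_by_id.get? adjustment_id with
        | none => latest_by_id.insert adjustment_id event
        | some existing =>
            if (PySem.Dict.ofList event).getD "created_at" "" ≥ (PySem.Dict.ofList existing).getD "created_at" "" then
              latest_by_id.insert adjustment_id event
            else latest_by_id) dA).items
      = ((events.foldl (fun groups event =>
          groups.modify ((PySem.Dict.ofList event).getD "adjustment_id" "") [] (· ++ [event])) dG).items).map
        (fun p => (p.1, pvReduceGroup p.2)) := by
  induction events generalizing dA dG with
  | nil => simpa using h1
  | cons e tl ih =>
    simp only [List.foldl_cons]
    set aid := (PySem.Dict.ofList e).getD "adjustment_id" "" with haid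
    have hrel := pv_get?_rel dA dG h1 aid
    have hcont : dA.contains aid = dG.contains aid := by
      rw [PySem.Dict.contains_eq_isSome_get?, PySem.Dict.contains_eq_isSome_get?, hrel]
      cases dG.get? aid <;> rfl
    cases hg : dG.get? aid with
    | none =>
      have hA : dA.get? aid = none := by rw [hrel, hg]; rfl
      have hncG : dG.contains aid = false := by
        rw [PySem.Dict.contains_eq_isSome_get?, hg]; rfl
      have hncA : dA.contains aid = false := by rw [hcont, hncG]
      have hGD : dG.getD aid [] = [] := PySem.Dict.getD_of_get?_eq_none _ _ hg
      apply ih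
      · simp only [hA, PySem.Dict.modify, hGD]
        rw [PySem.Dict.items_insert_of_not_contains dA e hncA,
            PySem.Dict.items_insert_of_not_contains dG _ hncG]
        simp [h1, pv_red_singleton]
      · intro p hp
        rw [PySem.Dict.modify] at hp
        rw [PySem.Dict.items_insert_of_not_contains dG _ hncG] at hp
        rcases List.mem_append.1 hp with h | h
        · exact h2 p h
        · simp at h; subst h; simp [hGD]
      · exact PySem.Dict.nodup_keys_insert _ _ _ h3
    | some g =>
      have hA : dA.get? aid = some (pvReduceGroup g) := by rw [hrel, hg]; rfl
      have hcG : dG.contains aid = true := by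
        rw [PySem.Dict.contains_eq_isSome_get?, hg]; rfl
      have hcA : dA.contains aid = true := by rw [hcont, hcG]
      have hmem : (aid, g) ∈ dG.items := PySem.Dict.mem_items_of_get?_eq_some _ hg
      have hgne : g ≠ [] := h2 _ hmem
      have hGD : dG.getD aid [] = g := PySem.Dict.getD_of_get?_eq_some _ _ hg
      have hred := pv_red_append g e hgne
      have hstepG : (PySem.Dict.modify dG aid [] (· ++ [e])).items
          = dG.items.map (fun p => if (p.1 == aid) = true then (aid, g ++ [e]) else p) := by
        rw [PySem.Dict.modify, hGD, PySem.Dict.items_insert_of_contains dG _ hcG]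
      apply ih
      · simp only [hA, hstepG]
        by_cases hc : (PySem.Dict.ofList e).getD "created_at" "" ≥ (PySem.Dict.ofList (pvReduceGroup g)).getD "created_at" ""
        · rw [if_pos hc]
          rw [PySem.Dict.items_insert_of_contains dA _ hcA, h1]
          simp only [List.map_map]
          apply List.map_congr_left
          intro q hq
          simp only [Function.comp_def]
          by_cases hk : (q.1 == aid) = true
          · simp [hk, hred, hc]
          · simp [hk]
        · rw [if_neg hc, h1]
          simp only [List.map_map]
          apply List.map_congr_left
          intro q hq
          simp only [Function.comp_def]
          by_cases hk : (q.1 == aid) = true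
          · have hq1 : q.1 = aid := by simpa using hk
            have : dG.get? q.1 = some q.2 := PySem.Dict.get?_of_mem_items dG (by simpa using hq) h3
            rw [hq1, hg] at this
            have hq2 : q.2 = g := by injection this with h'; exact h'.symm
            simp [hred, hc, hq1, hq2]
          · simp [hk]
      · intro p hp
        rw [hstepG] at hp
        rcases List.mem_map.1 hp with ⟨q, hq, hqe⟩
        by_cases hk : (q.1 == aid) = true
        · rw [if_pos hk] at hqe; subst hqe; simp
        · rw [if_neg hk] at hqe; subst hqe; exact h2 q hq
      · rw [PySem.Dict.modify]; exact PySem.Dict.nodup_keys_insert _ _ _ h3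

-- ===== VERDICT (by name: the statement is the Claim_ definition above) =====
theorem reduce_latest_adjustments_py_spec : Claim_equal_reduce_latest_adjustments_py := by
  intro events _ _
  unfold Spec_reduce_latest_adjustments_py
  unfold reduce_latest_adjustments_py reduce_latest_adjustments_py_alt
  simp only [PySem.Dict.values]
  rw [pv_main events PySem.Dict.empty PySem.Dict.empty rfl (by simp [PySem.Dict.empty]) (by simp [PySem.Dict.keys, PySem.Dict.empty])]
  simp [List.map_map, Function.comp_def]
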